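-- pv_equiv track=rewrite | github.com/thelordfish/Playfair-Cipher | Playfair Cipher004 + modulo maths.py | join_ij
-- ===== SOURCE A (Python) =====
-- def join_ij(thing):
--     result = []
--     foundij = False
--     for letter in thing:
--         if letter not in "IJ":
--             result.append(letter)
--         elif foundij == False:
--             result.append("IJ")
--             foundij = True
--     return result
-- ===== SOURCE B (Python) =====
-- def join_ij(thing):
--     items = list(thing)
--     kept = [c for c in items if c not in "IJ"]
--     idx = next((i for i, c in enumerate(items) if c in "IJ"), None)
--     if idx is not None:
--         kept.insert(idx, "IJ")
--     return kept
-- ===== Notes on version B (the rewrite author's own statement) =====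
-- stated objective: alternative
-- what changed: Replaces the stateful foundij-flag loop by a filter of the non-I/J elements plus locating the index of the first I/J element and splicing a single "IJ" in at that position.
import Mathlib
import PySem

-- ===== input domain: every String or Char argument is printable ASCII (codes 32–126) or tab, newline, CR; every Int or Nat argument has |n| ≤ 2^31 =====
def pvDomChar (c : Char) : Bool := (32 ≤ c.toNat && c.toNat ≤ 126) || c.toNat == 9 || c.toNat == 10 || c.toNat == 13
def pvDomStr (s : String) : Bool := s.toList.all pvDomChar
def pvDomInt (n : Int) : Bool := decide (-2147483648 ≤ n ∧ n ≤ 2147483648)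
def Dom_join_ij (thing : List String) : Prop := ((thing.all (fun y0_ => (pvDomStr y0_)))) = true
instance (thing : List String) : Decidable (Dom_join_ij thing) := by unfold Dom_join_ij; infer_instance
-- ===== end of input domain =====

-- B replaces A's stateful foundij-flag loop by filter + locate-first-I/J-index + single insert (objective: alternative decomposition).

-- ===== PORT A =====
-- the loop with its foundij flag, as structural recursion over the same state
def join_ij_go (thing : List String) (foundij : Bool) : List String :=
  match thing with
  | [] => []
  | letter :: rest =>
    if ¬ (PySem.Str.isIn letter "IJ" = true) then letter :: join_ij_go rest foundij
    else if foundij = false then "IJ" :: join_ij_go rest true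
    else join_ij_go rest foundij

def join_ij (thing : List String) : List String := join_ij_go thing false

-- ===== PORT B =====
def join_ij_alt (thing : List String) : List String :=
  let items := thing
  let kept := items.filter (fun c => !(PySem.Str.isIn c "IJ"))
  match items.findIdx? (fun c => PySem.Str.isIn c "IJ") with
  | some i => PySem.List.insert kept (i : Int) "IJ"
  | none => kept

-- ===== PRECONDITION & SPEC =====
def Spec_join_ij (thing : List String) (out : List String) : Prop := out = join_ij_alt thing
instance (thing : List String) (out : List String) : Decidable (Spec_join_ij thing out) := by unfold Spec_join_ij; infer_instance

-- ===== CLAIM (what is proved, stated in full; the proofs are below) =====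
def Claim_equal_join_ij : Prop := ∀ (thing : List String), Dom_join_ij thing → Spec_join_ij thing (join_ij thing)

-- ===== LEMMAS AND PROOFS =====

-- after the flag is set, A is exactly the filter
theorem join_ij_go_true (thing : List String) :
    join_ij_go thing true = thing.filter (fun c => !(PySem.Chars.isIn c.toList ['I', 'J'])) := by
  induction thing with
  | nil => rfl
  | cons x xs ih =>
    by_cases h : PySem.Chars.isIn x.toList ['I', 'J'] = true <;>
      simp [join_ij_go, h, ih]

-- the I/J element's index in the original list is a valid insert position in the filtered list
theorem findIdx_le_filter_length (xs : List String) (i : Nat)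
    (h : xs.findIdx? (fun c => PySem.Chars.isIn c.toList ['I', 'J']) = some i) :
    i ≤ (xs.filter (fun c => !(PySem.Chars.isIn c.toList ['I', 'J']))).length := by
  induction xs generalizing i with
  | nil => simp at h
  | cons x xs ih =>
    by_cases hx : PySem.Chars.isIn x.toList ['I', 'J'] = true
    · simp [List.findIdx?_cons, hx] at h
      omega
    · simp [List.findIdx?_cons, hx] at h
      obtain ⟨j, hj, rfl⟩ := h
      have := ih j (by simpa using hj)
      simp [hx]
      omega

theorem insert_cons_succ (x v : String) (l : List String) (i : Nat) (h : i ≤ l.length) :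
    PySem.List.insert (x :: l) (((i : Nat) + 1 : Nat) : Int) v
      = x :: PySem.List.insert l ((i : Nat) : Int) v := by
  rw [PySem.List.insert_natCast _ _ _ (by simpa using Nat.succ_le_succ h),
      PySem.List.insert_natCast _ _ _ h]
  simp

theorem join_ij_eq (thing : List String) : join_ij thing = join_ij_alt thing := by
  induction thing with
  | nil => rfl
  | cons x xs ih =>
    by_cases hx : PySem.Chars.isIn x.toList ['I', 'J'] = true
    · -- first I/J element found here: A emits "IJ" then filters; B inserts at index 0
      simp [join_ij, join_ij_go, hx, join_ij_alt, List.findIdx?_cons, join_ij_go_true, PySem.List.insert_zero]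
    · -- x kept by both; the found index (if any) shifts by one
      simp only [join_ij, join_ij_alt] at ih ⊢
      simp only [join_ij_go, List.findIdx?_cons, List.filter_cons]
      cases hfind : xs.findIdx? (fun c => PySem.Chars.isIn c.toList ['I', 'J']) with
      | none =>
        simp [hx, hfind] at ih ⊢
        exact ih
      | some i =>
        have hle := findIdx_le_filter_length xs i hfind
        simp [hx, hfind] at ih ⊢
        rw [show ((i : Nat) + 1 : Int) = (((i : Nat) + 1 : Nat) : Int) by push_cast; ring]
        rw [insert_cons_succ _ _ _ _ (by simpa using hle)]
        simp [ih]

-- ===== VERDICT (by name: the statement is the Claim_ definition above) =====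
theorem join_ij_spec : Claim_equal_join_ij := by
  intro thing _
  unfold Spec_join_ij
  exact join_ij_eq thing
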